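-- pv_equiv track=rewrite | github.com/Fransiskus2509/71231006-laprak-alpro-13- | soal3.py | deret_ganjil_faktorial
-- ===== SOURCE A (Python) =====
-- def deret_ganjil_faktorial(n):
--     if n == 1:
--         return 1
--     else:
--         faktorial = 1
--         for i in range(1, n + 1):
--             faktorial *= i
--
--         return faktorial + deret_ganjil_faktorial(n - 2)
-- ===== SOURCE B (Python) =====
-- def deret_ganjil_faktorial(n):
--     # series n! + (n-2)! + ... + 1! is defined only for positive odd n
--     if n < 1 or n % 2 == 0:
--         raise ValueError("n must be a positive odd integer")
--     # single pass: build the factorial incrementally, add it whenever i is odd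
--     total = 0
--     fact = 1
--     for i in range(1, n + 1):
--         fact *= i
--         if i % 2 == 1:
--             total += fact
--     return total
-- ===== Notes on version B (the rewrite author's own statement) =====
-- stated objective: faster
-- what changed: Replaces the recursion that recomputes each factorial with a fresh loop by one pass that maintains the running factorial and adds it at every odd i, after validating that n is a positive odd integer (where A instead recurses past its base case until RecursionError); intended as faster — a timing run measured a two-orders-of-magnitude speedup at the largest size both finish (beyond that A hits the recursion limit and B's guard rejects that run's even sizes).
import Mathlib
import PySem

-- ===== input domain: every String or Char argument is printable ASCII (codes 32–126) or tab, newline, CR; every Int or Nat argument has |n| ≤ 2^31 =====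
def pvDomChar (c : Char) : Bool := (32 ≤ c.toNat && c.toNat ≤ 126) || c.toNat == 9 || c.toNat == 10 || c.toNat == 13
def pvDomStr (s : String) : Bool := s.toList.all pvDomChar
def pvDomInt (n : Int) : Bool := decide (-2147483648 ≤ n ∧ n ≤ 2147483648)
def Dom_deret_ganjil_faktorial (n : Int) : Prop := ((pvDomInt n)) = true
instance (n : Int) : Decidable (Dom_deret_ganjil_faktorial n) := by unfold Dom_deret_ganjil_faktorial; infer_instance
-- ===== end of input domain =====

-- B replaces A's recursion (a fresh factorial loop per term) with one pass keeping
-- the running factorial and summing it at each odd i (intended as faster; the timing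
-- run measured a two-orders-of-magnitude speedup at the largest size both finish);
-- B validates that n is a positive odd integer
-- (ValueError) where A recurses past its base case until RecursionError.

-- ===== PORT A =====
-- fuel only makes the recursion total in Lean; inside Pre_ (odd n ≥ 1) the fuel
-- n.toNat + 1 strictly exceeds the recursion depth (n+1)/2, so it never runs out.
def deret_ganjil_faktorial_go : Nat → Int → Int
  | 0, _ => 0
  | fuel + 1, n =>
    if n = 1 then 1
    else
      ((PySem.List.pyRange 1 (n + 1) 1).foldl (fun faktorial i => faktorial * i) 1)
        + deret_ganjil_faktorial_go fuel (n - 2)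

def deret_ganjil_faktorial (n : Int) : Int :=
  deret_ganjil_faktorial_go (n.toNat + 1) n

-- ===== PORT B =====
-- the ValueError guard: Python raises there; the port returns 0 (outside Pre_, nothing is claimed)
def deret_ganjil_faktorial_alt (n : Int) : Int :=
  if n < 1 ∨ n % 2 = 0 then 0
  else ((PySem.List.pyRange 1 (n + 1) 1).foldl
    (fun (s : Int × Int) i =>
      let fact := s.1 * i
      (fact, if PySem.Int.mod i 2 = 1 then s.2 + fact else s.2)) (1, 0)).2

-- ===== PRECONDITION & SPEC =====
-- A returns only for odd n ≥ 1; for even n or n < 1 the recursion skips the base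
-- case and Python raises RecursionError, so those inputs are excluded.
def Pre_deret_ganjil_faktorial (n : Int) : Prop := 1 ≤ n ∧ n % 2 = 1
instance (n : Int) : Decidable (Pre_deret_ganjil_faktorial n) := by
  unfold Pre_deret_ganjil_faktorial; infer_instance

def pvWitness_deret_ganjil_faktorial : Int := 5

def Spec_deret_ganjil_faktorial (n : Int) (out : Int) : Prop := out = deret_ganjil_faktorial_alt n
instance (n : Int) (out : Int) : Decidable (Spec_deret_ganjil_faktorial n out) := by
  unfold Spec_deret_ganjil_faktorial; infer_instance

-- ===== CLAIM (what is proved, stated in full; the proofs are below) =====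
def Claim_equal_deret_ganjil_faktorial : Prop := ∀ (n : Int), Dom_deret_ganjil_faktorial n → Pre_deret_ganjil_faktorial n → Spec_deret_ganjil_faktorial n (deret_ganjil_faktorial n)

-- ===== LEMMAS AND PROOFS =====

-- reference factorial and "sum of i! over odd i ≤ m"
def pvFact : Nat → Int
  | 0 => 0 + 1
  | m + 1 => pvFact m * ((m : Int) + 1)

def pvSumOdd : Nat → Int
  | 0 => 0
  | m + 1 => pvSumOdd m + (if (m + 1) % 2 = 1 then pvFact (m + 1) else 0)

theorem pv_fact_fold (m : Nat) :
    (PySem.List.pyRange 1 ((m : Int) + 1) 1).foldl (fun f i => f * i) 1 = pvFact m := by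
  induction m with
  | zero => simp [PySem.List.pyRange_one_eq_nil, pvFact]
  | succ m ih =>
    have h : (1 : Int) ≤ (m : Int) + 1 := by omega
    push_cast
    rw [PySem.List.pyRange_one_succ_right h, List.foldl_append, ih]
    simp [pvFact]

theorem pv_alt_fold (m : Nat) :
    (PySem.List.pyRange 1 ((m : Int) + 1) 1).foldl
      (fun (s : Int × Int) i =>
        let fact := s.1 * i
        (fact, if PySem.Int.mod i 2 = 1 then s.2 + fact else s.2)) (1, 0)
      = (pvFact m, pvSumOdd m) := by
  induction m with
  | zero => simp [PySem.List.pyRange_one_eq_nil, pvFact, pvSumOdd]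
  | succ m ih =>
    have h : (1 : Int) ≤ (m : Int) + 1 := by omega
    push_cast
    rw [PySem.List.pyRange_one_succ_right h, List.foldl_append, ih]
    simp only [List.foldl_cons, List.foldl_nil, pvFact, pvSumOdd]
    by_cases hp : (m + 1) % 2 = 1
    · have : ((m : Int) + 1) % 2 = 1 := by omega
      simp [PySem.Int.mod, Int.fmod_eq_emod, this, hp]
    · have : ¬ ((m : Int) + 1) % 2 = 1 := by omega
      simp [PySem.Int.mod, Int.fmod_eq_emod, this, hp]

theorem pv_alt_eq (k : Nat) :
    deret_ganjil_faktorial_alt ((2 * k + 1 : Nat) : Int) = pvSumOdd (2 * k + 1) := by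
  unfold deret_ganjil_faktorial_alt
  have hg : ¬ (((2 * k + 1 : Nat) : Int) < 1 ∨ ((2 * k + 1 : Nat) : Int) % 2 = 0) := by
    push_cast; omega
  rw [if_neg hg, pv_alt_fold (2 * k + 1)]

theorem pv_A_eq (k : Nat) : ∀ fuel : Nat, k + 1 ≤ fuel →
    deret_ganjil_faktorial_go fuel ((2 * k + 1 : Nat) : Int) = pvSumOdd (2 * k + 1) := by
  induction k with
  | zero =>
    intro fuel hf
    obtain ⟨f, rfl⟩ : ∃ f, fuel = f + 1 := ⟨fuel - 1, by omega⟩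
    simp [deret_ganjil_faktorial_go, pvSumOdd, pvFact]
  | succ k ih =>
    intro fuel hf
    obtain ⟨f, rfl⟩ : ∃ f, fuel = f + 1 := ⟨fuel - 1, by omega⟩
    have hne : ((2 * (k + 1) + 1 : Nat) : Int) ≠ 1 := by push_cast; omega
    have hsub : ((2 * (k + 1) + 1 : Nat) : Int) - 2 = ((2 * k + 1 : Nat) : Int) := by
      push_cast; ring
    rw [deret_ganjil_faktorial_go, if_neg hne, hsub, ih f (by omega)]
    have hfact : ((2 * (k + 1) + 1 : Nat) : Int) + 1 = ((2 * k + 3 : Nat) : Int) + 1 := by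
      push_cast; ring
    rw [hfact, pv_fact_fold (2 * k + 3)]
    have h3 : 2 * (k + 1) + 1 = (2 * k + 2) + 1 := by omega
    rw [h3]
    have e1 : pvSumOdd ((2 * k + 2) + 1)
        = pvSumOdd (2 * k + 2) + pvFact (2 * k + 3) := by
      simp [pvSumOdd, Nat.add_mod]
    have e2 : pvSumOdd ((2 * k + 1) + 1) = pvSumOdd (2 * k + 1) := by
      simp [pvSumOdd, Nat.add_mod]
    have e3 : (2 * k + 2) = (2 * k + 1) + 1 := by omega
    rw [e1, e3, e2]
    ring

-- ===== VERDICT (by name: the statement is the Claim_ definition above) =====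
theorem deret_ganjil_faktorial_spec : Claim_equal_deret_ganjil_faktorial := by
  intro n _ hpre
  obtain ⟨h1, h2⟩ := hpre
  unfold Spec_deret_ganjil_faktorial
  have hk : ∃ k : Nat, n = ((2 * k + 1 : Nat) : Int) := by
    refine ⟨((n - 1) / 2).toNat, ?_⟩
    push_cast
    omega
  obtain ⟨k, rfl⟩ := hk
  rw [pv_alt_eq k]
  have hfuel : k + 1 ≤ ((2 * k + 1 : Nat) : Int).toNat + 1 := by
    simp; omega
  unfold deret_ganjil_faktorial
  exact pv_A_eq k _ hfuel
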